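-- pv_equiv track=rewrite | github.com/BossWT/CUComProg | 09_MoreDC/09_MoreDC_34.py | pattern1
-- ===== SOURCE A (Python) =====
-- def pattern1(nrows, ncols):
--     ans = []
--     num = 1
--     for i in range(nrows):
--         c = []
--         for j in range(ncols):
--             c.append(num)
--             num += 1
--         ans.append(c)
--     return ans
-- ===== SOURCE B (Python) =====
-- def pattern1(nrows, ncols):
--     # Each row computed independently in closed form: row i holds i*ncols+1 .. i*ncols+ncols.
--     return [list(range(i * ncols + 1, i * ncols + ncols + 1)) for i in range(nrows)]
-- ===== Notes on version B (the rewrite author's own statement) =====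
-- stated objective: simpler
-- what changed: Replaced the shared running counter threaded through two nested loops by a closed-form per-row range: row i is range(i*ncols+1, i*ncols+ncols+1), so no mutable state crosses rows.
import Mathlib
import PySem

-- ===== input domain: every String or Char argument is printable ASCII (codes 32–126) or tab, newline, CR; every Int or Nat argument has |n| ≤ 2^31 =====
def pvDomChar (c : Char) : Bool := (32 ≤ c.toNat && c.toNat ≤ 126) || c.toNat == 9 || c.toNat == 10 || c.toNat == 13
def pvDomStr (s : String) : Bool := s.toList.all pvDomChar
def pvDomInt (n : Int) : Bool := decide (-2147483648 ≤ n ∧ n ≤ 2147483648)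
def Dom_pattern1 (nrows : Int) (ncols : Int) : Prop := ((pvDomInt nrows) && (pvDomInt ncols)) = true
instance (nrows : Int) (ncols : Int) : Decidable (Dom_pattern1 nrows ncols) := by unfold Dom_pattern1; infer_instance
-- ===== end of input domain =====

-- B drops A's running counter: each row is the closed-form range i*ncols+1 .. i*ncols+ncols (objective: simpler).

-- ===== PORT A =====
-- A: outer loop over rows threads a running counter `num` through an inner loop that appends it.
def pattern1 (nrows : Int) (ncols : Int) : List (List Int) :=
  let st :=
    (PySem.List.pyRange 0 nrows 1).foldl
      (fun (st : List (List Int) × Int) _i =>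
        let inner :=
          (PySem.List.pyRange 0 ncols 1).foldl
            (fun (p : List Int × Int) _j => (p.1 ++ [p.2], p.2 + 1)) ([], st.2)
        (st.1 ++ [inner.1], inner.2))
      ([], 1)
  st.1

-- ===== PORT B =====
-- B: each row independently, in closed form.
def pattern1_alt (nrows : Int) (ncols : Int) : List (List Int) :=
  (PySem.List.pyRange 0 nrows 1).map
    (fun i => PySem.List.pyRange (i * ncols + 1) (i * ncols + ncols + 1) 1)

-- ===== PRECONDITION & SPEC =====
def Spec_pattern1 (nrows : Int) (ncols : Int) (out : List (List Int)) : Prop := out = pattern1_alt nrows ncols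
instance (nrows : Int) (ncols : Int) (out : List (List Int)) : Decidable (Spec_pattern1 nrows ncols out) := by unfold Spec_pattern1; infer_instance

-- ===== CLAIM (what is proved, stated in full; the proofs are below) =====
def Claim_equal_pattern1 : Prop := ∀ (nrows : Int) (ncols : Int), Dom_pattern1 nrows ncols → Spec_pattern1 nrows ncols (pattern1 nrows ncols)

-- ===== LEMMAS AND PROOFS =====

-- A's inner loop appends the consecutive integers num .. num+|l|-1 and advances the counter by |l|.
theorem pattern1_inner (l : List Int) (acc : List Int) (num : Int) :
    l.foldl (fun (p : List Int × Int) _j => (p.1 ++ [p.2], p.2 + 1)) (acc, num)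
      = (acc ++ PySem.List.pyRange num (num + l.length) 1, num + l.length) := by
  induction l generalizing acc num with
  | nil => simp [PySem.List.pyRange_one_eq_nil le_rfl]
  | cons x tl ih =>
      simp only [List.foldl_cons, ih, List.length_cons, Prod.mk.injEq]
      refine ⟨?_, by push_cast; ring⟩
      have h : num + ((tl.length : Int) + 1) = num + 1 + (tl.length : Int) := by ring
      push_cast
      rw [h, PySem.List.pyRange_one_cons (a := num) (b := num + 1 + (tl.length : Int))
        (by omega)]
      simp

-- A's outer loop, after the inner loop is summarised: rows are consecutive blocks of width c.
theorem pattern1_outer (l : List Int) (c : Int) (acc : List (List Int)) (num : Int) :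
    l.foldl (fun (st : List (List Int) × Int) _i =>
        (st.1 ++ [PySem.List.pyRange st.2 (st.2 + c) 1], st.2 + c)) (acc, num)
      = (acc ++ (List.range l.length).map
            (fun k : Nat => PySem.List.pyRange (num + (k : Int) * c) (num + (k : Int) * c + c) 1),
         num + l.length * c) := by
  induction l generalizing acc num with
  | nil => simp
  | cons x tl ih =>
      simp only [List.foldl_cons, ih, List.length_cons, List.range_succ_eq_map,
        List.map_cons, List.map_map, Prod.mk.injEq]
      refine ⟨?_, by push_cast; ring⟩
      simp only [List.append_assoc, List.singleton_append]
      congr 1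
      congr 1
      · norm_num
      · apply List.map_congr_left
        intro k _
        simp only [Function.comp]
        congr 1 <;> push_cast <;> ring

theorem pattern1_spec : Claim_equal_pattern1 := by
  intro nrows ncols _
  unfold Spec_pattern1 pattern1 pattern1_alt
  have hlen : ((PySem.List.pyRange 0 ncols 1).length : Int) = (ncols.toNat : Int) := by
    simp [PySem.List.length_pyRange_one]
  have hinner : ∀ (st : List (List Int) × Int),
      (fun (st : List (List Int) × Int) _i =>
        let inner :=
          (PySem.List.pyRange 0 ncols 1).foldl
            (fun (p : List Int × Int) _j => (p.1 ++ [p.2], p.2 + 1)) ([], st.2)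
        (st.1 ++ [inner.1], inner.2)) st
      = (fun (st : List (List Int) × Int) (_i : Int) =>
          (st.1 ++ [PySem.List.pyRange st.2 (st.2 + (ncols.toNat : Int)) 1],
           st.2 + (ncols.toNat : Int))) st := by
    intro st
    funext i
    simp only [pattern1_inner, List.nil_append, hlen]
  simp only [funext hinner, pattern1_outer, List.nil_append,
    PySem.List.pyRange_one 0 nrows, List.length_map, List.length_range, List.map_map]
  apply List.map_congr_left
  intro k _
  by_cases h : 0 ≤ ncols
  · have : (ncols.toNat : Int) = ncols := Int.toNat_of_nonneg h
    simp only [Function.comp, this]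
    congr 1 <;> ring
  · have hc : (ncols.toNat : Int) = 0 := by omega
    simp only [Function.comp, hc]
    rw [PySem.List.pyRange_one_eq_nil (by omega), PySem.List.pyRange_one_eq_nil (by omega)]
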